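-- pv_equiv track=rewrite | github.com/theodoresiu/aoc | 2022/day3/python/day3.py | process_parts
-- ===== SOURCE A (Python) =====
-- def process_parts(p1, p2):
--     s1 = set()
--     for c in p1:
--         s1.add(c)
--     for c in p2:
--         if c in s1:
--             return c
--     return None
-- ===== SOURCE B (Python) =====
-- def process_parts(p1, p2):
--     best = -1
--     for c in p1:
--         i = p2.find(c)
--         if i != -1 and (best == -1 or i < best):
--             best = i
--     return p2[best] if best != -1 else None
-- ===== Notes on version B (the rewrite author's own statement) =====
-- stated objective: alternative
-- what changed: B inverts the traversal: instead of indexing p1 into a set and scanning p2 for the first member, it scans p1 and keeps the minimum p2.find index over p1's characters, then returns p2[best].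
import Mathlib
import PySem

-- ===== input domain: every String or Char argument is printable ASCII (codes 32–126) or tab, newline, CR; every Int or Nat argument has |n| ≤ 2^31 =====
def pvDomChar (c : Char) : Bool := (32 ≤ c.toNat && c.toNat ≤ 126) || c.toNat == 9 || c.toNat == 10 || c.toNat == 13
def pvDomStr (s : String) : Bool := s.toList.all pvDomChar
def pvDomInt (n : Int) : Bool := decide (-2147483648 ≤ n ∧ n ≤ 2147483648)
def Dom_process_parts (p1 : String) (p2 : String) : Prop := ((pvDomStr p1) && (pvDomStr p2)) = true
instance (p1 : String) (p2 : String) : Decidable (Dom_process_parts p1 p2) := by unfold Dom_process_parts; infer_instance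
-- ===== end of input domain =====

-- B inverts the traversal: instead of building a set from p1 and scanning p2 for the first
-- member, it scans p1 keeping the minimum p2.find index and returns p2[best]; same value.

-- ===== PORT A =====
-- second loop of A: for c in p2: if c in s1: return c
def pvScanA (s1 : PySem.Set Char) : List Char → Option String
  | [] => none
  | c :: rest => if PySem.Set.contains s1 c then some (String.ofList [c]) else pvScanA s1 rest

def process_parts (p1 : String) (p2 : String) : Option String :=
  let s1 := p1.toList.foldl PySem.Set.add PySem.Set.empty   -- s1 = set(); for c in p1: s1.add(c)
  pvScanA s1 p2.toList

-- ===== PORT B =====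
-- loop body of B: i = p2.find(c); if i != -1 and (best == -1 or i < best): best = i
def pvFoldB (p2 : String) (best : Int) (c : Char) : Int :=
  let i := PySem.Str.find p2 (String.ofList [c])
  if i ≠ -1 ∧ (best = -1 ∨ i < best) then i else best

def process_parts_alt (p1 : String) (p2 : String) : Option String :=
  let best := p1.toList.foldl (pvFoldB p2) (-1)
  if best ≠ -1 then (PySem.Str.pyGet? p2 best).map (fun c => String.ofList [c]) else none

-- ===== PRECONDITION & SPEC =====
def Spec_process_parts (p1 : String) (p2 : String) (out : Option String) : Prop := out = process_parts_alt p1 p2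
instance (p1 : String) (p2 : String) (out : Option String) : Decidable (Spec_process_parts p1 p2 out) := by unfold Spec_process_parts; infer_instance

-- ===== CLAIM (what is proved, stated in full; the proofs are below) =====
def Claim_equal_process_parts : Prop := ∀ (p1 : String) (p2 : String), Dom_process_parts p1 p2 → Spec_process_parts p1 p2 (process_parts p1 p2)

-- ===== LEMMAS AND PROOFS =====

-- list-level version of A's second loop, membership tested on the raw list
def pvScanL (xs : List Char) : List Char → Option String
  | [] => none
  | c :: rest => if xs.contains c then some (String.ofList [c]) else pvScanL xs rest

lemma pvScan_eq (xs : List Char) (ys : List Char) :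
    pvScanA (PySem.Set.ofList xs) ys = pvScanL xs ys := by
  induction ys with
  | nil => rfl
  | cons c rest ih =>
    simp only [pvScanA, pvScanL, ih]
    congr 1
    simp [PySem.Set.mem_ofList]

-- the accumulator invariant of B's loop: after processing the characters S of p1,
-- best is -1 iff no character of S occurs in ys, else the first position of ys whose
-- character lies in S
def pvInv (ys : List Char) (S : List Char) (b : Int) : Prop :=
  (b = -1 ∧ ∀ c ∈ S, c ∉ ys) ∨
  (∃ pre d post, ys = pre ++ d :: post ∧ b = (pre.length : Int) ∧ d ∈ S ∧ ∀ e ∈ pre, e ∉ S)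

-- p2.find(c) for a single character: -1 if absent, else the first occurrence split
lemma find_go_single (c : Char) : ∀ (ys : List Char) (k : Nat),
    (c ∉ ys ∧ PySem.Chars.find.go [c] ys k = -1) ∨
    (∃ pre post, ys = pre ++ c :: post ∧ c ∉ pre ∧
      PySem.Chars.find.go [c] ys k = ((k + pre.length : Nat) : Int)) := by
  intro ys
  induction ys with
  | nil => intro k; left; simp [PySem.Chars.find.go]
  | cons h t ih =>
    intro k
    by_cases hc : c = h
    · right
      refine ⟨[], t, by simp [hc], by simp, ?_⟩
      simp [PySem.Chars.find.go, List.isPrefixOf, hc]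
    · have hpre : ([c].isPrefixOf (h :: t)) = false := by
        simp [List.isPrefixOf]; exact fun h' => absurd h' hc
      rcases ih (k + 1) with ⟨hmem, hval⟩ | ⟨pre, post, hsplit, hnp, hval⟩
      · left
        constructor
        · simp [hmem, hc]
        · simp [PySem.Chars.find.go, hpre, hval]
      · right
        refine ⟨h :: pre, post, by simp [hsplit], ?_, ?_⟩
        · simp [hnp]; exact fun h' => absurd h' hc
        · simp only [PySem.Chars.find.go, hpre, Bool.false_eq_true, if_false, hval,
            List.length_cons]
          push_cast
          omega

lemma find_single (ys : List Char) (c : Char) :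
    (c ∉ ys ∧ PySem.Chars.find ys [c] = -1) ∨
    (∃ pre post, ys = pre ++ c :: post ∧ c ∉ pre ∧
      PySem.Chars.find ys [c] = (pre.length : Int)) := by
  have := find_go_single c ys 0
  simpa [PySem.Chars.find] using this

lemma pvFoldB_eq (p2 : String) (b : Int) (c : Char) :
    pvFoldB p2 b c =
      (if PySem.Chars.find p2.toList [c] ≠ -1 ∧ (b = -1 ∨ PySem.Chars.find p2.toList [c] < b)
        then PySem.Chars.find p2.toList [c] else b) := by
  simp [pvFoldB, PySem.Str.find_eq]

lemma pvInv_step (p2 : String) (S : List Char) (b : Int) (c : Char)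
    (h : pvInv p2.toList S b) : pvInv p2.toList (S ++ [c]) (pvFoldB p2 b c) := by
  rw [pvFoldB_eq]
  rcases find_single p2.toList c with ⟨hcm, hfv⟩ | ⟨pre, post, hsplit, hcp, hfv⟩
  · -- c not in p2: find = -1, best unchanged
    rw [hfv]
    simp only [ne_eq, not_true_eq_false, false_and, if_false]
    rcases h with ⟨hb, hnone⟩ | ⟨pre, d, post, hsplit, hb, hd, hp⟩
    · left
      refine ⟨hb, ?_⟩
      intro e he
      rcases List.mem_append.mp he with h' | h'
      · exact hnone e h'
      · simp at h'; subst h'; exact hcm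
    · right
      refine ⟨pre, d, post, hsplit, hb, by simp [hd], ?_⟩
      intro e he hmem
      rcases List.mem_append.mp hmem with h' | h'
      · exact hp e he h'
      · simp at h'; subst h'
        exact hcm (by rw [hsplit]; exact List.mem_append.mpr (Or.inl he))
  · -- c occurs in p2 at position pre.length
    rw [hfv]
    rcases h with ⟨hb, hnone⟩ | ⟨pre', d, post', hsplit', hb, hd, hp⟩
    · -- previous best -1: take c's position
      subst hb
      rw [if_pos ⟨by omega, Or.inl rfl⟩]
      right
      refine ⟨pre, c, post, hsplit, rfl, by simp, ?_⟩
      intro e he hmem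
      rcases List.mem_append.mp hmem with h' | h'
      · exact hnone e h' (by rw [hsplit]; exact List.mem_append.mpr (Or.inl he))
      · simp at h'; subst h'; exact hcp he
    · subst hb
      have h1 : pre <+: p2.toList := ⟨c :: post, hsplit.symm⟩
      have h2 : pre' <+: p2.toList := ⟨d :: post', hsplit'.symm⟩
      by_cases hlt : (pre.length : Int) < (pre'.length : Int)
      · -- new strictly smaller index wins
        rw [if_pos ⟨by omega, Or.inr hlt⟩]
        right
        refine ⟨pre, c, post, hsplit, rfl, by simp, ?_⟩
        intro e he hmem
        have hpref : pre <+: pre' := List.prefix_of_prefix_length_le h1 h2 (by omega)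
        rcases List.mem_append.mp hmem with h' | h'
        · exact hp e (hpref.subset he) h'
        · simp at h'; subst h'; exact hcp he
      · -- old best stays
        rw [if_neg (by push Not; intro _; exact ⟨by omega, by omega⟩)]
        right
        refine ⟨pre', d, post', hsplit', rfl, by simp [hd], ?_⟩
        intro e he hmem
        rcases List.mem_append.mp hmem with h' | h'
        · exact hp e he h'
        · simp at h'; subst h'
          have hpref : pre' <+: pre := List.prefix_of_prefix_length_le h2 h1 (by omega)
          exact hcp (hpref.subset he)

lemma pvInv_foldl (p2 : String) : ∀ (xs : List Char) (S : List Char) (b : Int),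
    pvInv p2.toList S b → pvInv p2.toList (S ++ xs) (xs.foldl (pvFoldB p2) b) := by
  intro xs
  induction xs with
  | nil => intro S b h; simpa using h
  | cons c rest ih =>
    intro S b h
    have := ih (S ++ [c]) (pvFoldB p2 b c) (pvInv_step p2 S b c h)
    simpa using this

lemma pvScanL_none (xs : List Char) : ∀ (ys : List Char), (∀ c ∈ xs, c ∉ ys) → pvScanL xs ys = none := by
  intro ys
  induction ys with
  | nil => intro _; rfl
  | cons h t ih =>
    intro hn
    have hh : xs.contains h = false := by
      by_contra hc
      have : h ∈ xs := by
        simpa using (Bool.not_eq_false _).mp hc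
      exact hn h this (by simp)
    simp only [pvScanL, hh, Bool.false_eq_true, if_false]
    exact ih (fun c hc hm => hn c hc (by simp [hm]))

lemma pvScanL_hit (xs : List Char) (d : Char) (post : List Char) (hd : d ∈ xs) :
    ∀ (pre : List Char), (∀ e ∈ pre, e ∉ xs) →
      pvScanL xs (pre ++ d :: post) = some (String.ofList [d]) := by
  intro pre
  induction pre with
  | nil =>
    intro _
    simp [pvScanL, hd]
  | cons h t ih =>
    intro hp
    have hh : xs.contains h = false := by
      by_contra hc
      exact hp h (by simp) (by simpa using (Bool.not_eq_false _).mp hc)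
    simp only [List.cons_append, pvScanL, hh, Bool.false_eq_true, if_false]
    exact ih (fun e he => hp e (by simp [he]))

-- ===== VERDICT (by name: the statement is the Claim_ definition above) =====
theorem process_parts_spec : Claim_equal_process_parts := by
  intro p1 p2 _
  show process_parts p1 p2 = process_parts_alt p1 p2
  have hA : process_parts p1 p2 = pvScanL p1.toList p2.toList := by
    have h : p1.toList.foldl PySem.Set.add PySem.Set.empty = PySem.Set.ofList p1.toList :=
      (PySem.Set.ofList_eq_foldl p1.toList).symm
    simp only [process_parts, h, pvScan_eq]
  have hInv : pvInv p2.toList p1.toList (p1.toList.foldl (pvFoldB p2) (-1)) := by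
    have := pvInv_foldl p2 p1.toList [] (-1) (Or.inl ⟨rfl, by simp⟩)
    simpa using this
  rw [hA]
  simp only [process_parts_alt]
  rcases hInv with ⟨hb, hnone⟩ | ⟨pre, d, post, hsplit, hb, hd, hp⟩
  · rw [hb]
    simp only [ne_eq, not_true_eq_false, if_false]
    exact pvScanL_none p1.toList p2.toList hnone
  · rw [hb, hsplit]
    have hget : PySem.Str.pyGet? p2 ((pre.length : Nat) : Int) = some d := by
      rw [PySem.Str.pyGet?_natCast, hsplit]
      simp
    rw [if_pos (by omega)]
    rw [hget]
    simp only [Option.map_some]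
    exact pvScanL_hit p1.toList d post hd pre hp
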